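-- pv_equiv track=rewrite | github.com/DrK-ode/AoC2024 | AoC2024-08/AoC2024-08.py | find_antinodes_part2
-- ===== SOURCE A (Python) =====
-- def find_antinodes_part2(antenna_locations: list[(int, int)], width: int, height: int) -> list[(int, int)]:
--     antinodes = []
--     for i, location1 in enumerate(antenna_locations):
--         for j in range(i + 1, len(antenna_locations)):
--             location2 = antenna_locations[j]
--             dx = location2[0] - location1[0]
--             dy = location2[1] - location1[1]
--             n = 0
--             while True:
--                 antinode = (location1[0] + n * dx, location1[1] + n * dy)
--                 if 0 <= antinode[0] < width and 0 <= antinode[1] < height: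
--                     antinodes.append(antinode)
--                     n -= 1
--                 else:
--                     break
--             n = 1
--             while True:
--                 antinode = (location1[0] + n * dx, location1[1] + n * dy)
--                 if 0 <= antinode[0] < width and 0 <= antinode[1] < height:
--                     antinodes.append(antinode)
--                     n += 1
--                 else:
--                     break
--     return antinodes
-- ===== SOURCE B (Python) =====
-- # Closed-form re-implementation: instead of stepping point by point with two
-- # while-loops, each pair's feasible multiplier interval [lo, hi] is computed by
-- # integer ceil/floor division per axis, then the points are emitted directly.
--
--
-- def _axis_bounds(p, d, limit):
--     """Bounds (lo, hi) on n with 0 <= p + n*d < limit; None = empty, a None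
--     component = unbounded on that side (only when d == 0)."""
--     if d == 0:
--         return (None, None) if 0 <= p < limit else None
--     if d > 0:
--         return (-(p // d), (limit - 1 - p) // d)
--     return (-((limit - 1 - p) // -d), p // -d)
--
--
-- def find_antinodes_part2(antenna_locations: list[(int, int)], width: int, height: int) -> list[(int, int)]:
--     antinodes = []
--     for i, location1 in enumerate(antenna_locations):
--         x1, y1 = location1
--         for j in range(i + 1, len(antenna_locations)):
--             x2, y2 = antenna_locations[j]
--             dx = x2 - x1
--             dy = y2 - y1
--             rx = _axis_bounds(x1, dx, width)
--             ry = _axis_bounds(y1, dy, height)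
--             if rx is None or ry is None:
--                 continue
--             lo = rx[0] if ry[0] is None else ry[0] if rx[0] is None else max(rx[0], ry[0])
--             hi = rx[1] if ry[1] is None else ry[1] if rx[1] is None else min(rx[1], ry[1])
--             if lo is None or hi is None:
--                 continue  # coincident in-bounds antennas: no finite point set
--             if lo <= 0 <= hi:
--                 for n in range(0, lo - 1, -1):
--                     antinodes.append((x1 + n * dx, y1 + n * dy))
--             if lo <= 1 <= hi:
--                 for n in range(1, hi + 1):
--                     antinodes.append((x1 + n * dx, y1 + n * dy))
--     return antinodes
-- ===== Notes on version B (the rewrite author's own statement) =====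
-- stated objective: alternative
-- what changed: Per antenna pair, A's two step-and-test while loops are replaced by a closed-form computation of the feasible multiplier interval [lo, hi] via per-axis integer ceil/floor division, after which the antinode points are emitted directly in A's order.
import Mathlib
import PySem

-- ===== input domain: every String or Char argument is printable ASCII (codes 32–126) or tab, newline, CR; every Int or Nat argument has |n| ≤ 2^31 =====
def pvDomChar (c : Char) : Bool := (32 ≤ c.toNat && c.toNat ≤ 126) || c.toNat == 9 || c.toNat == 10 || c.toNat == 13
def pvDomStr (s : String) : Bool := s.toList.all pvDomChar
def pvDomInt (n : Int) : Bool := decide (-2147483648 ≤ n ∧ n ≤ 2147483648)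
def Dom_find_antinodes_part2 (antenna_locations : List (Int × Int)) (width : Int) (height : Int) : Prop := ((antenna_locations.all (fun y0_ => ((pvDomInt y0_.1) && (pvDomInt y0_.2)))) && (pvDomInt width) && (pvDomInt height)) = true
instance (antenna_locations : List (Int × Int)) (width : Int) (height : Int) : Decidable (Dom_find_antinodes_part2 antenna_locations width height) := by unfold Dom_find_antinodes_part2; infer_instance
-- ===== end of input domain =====

-- B replaces A's two step-and-test while loops per antenna pair by a closed-form
-- integer interval of the line multiplier n (ceil/floor division per axis);
-- objective: alternative algorithm, same emitted points in the same order.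

-- ===== PORT A =====
-- the Python `while True` walks; fuel-bounded recursion, fuel proven sufficient on Dom ∧ Pre_
def pvFuel : Nat := 8589934592  -- 2^33

def pvDownA (x1 y1 dx dy wd ht : Int) : Nat → Int → List (Int × Int) → List (Int × Int)
  | 0, _, acc => acc
  | f + 1, n, acc =>
    if 0 ≤ x1 + n * dx ∧ x1 + n * dx < wd ∧ 0 ≤ y1 + n * dy ∧ y1 + n * dy < ht then
      pvDownA x1 y1 dx dy wd ht f (n - 1) (acc ++ [(x1 + n * dx, y1 + n * dy)])
    else acc

def pvUpA (x1 y1 dx dy wd ht : Int) : Nat → Int → List (Int × Int) → List (Int × Int)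
  | 0, _, acc => acc
  | f + 1, n, acc =>
    if 0 ≤ x1 + n * dx ∧ x1 + n * dx < wd ∧ 0 ≤ y1 + n * dy ∧ y1 + n * dy < ht then
      pvUpA x1 y1 dx dy wd ht f (n + 1) (acc ++ [(x1 + n * dx, y1 + n * dy)])
    else acc

def find_antinodes_part2 (antenna_locations : List (Int × Int)) (width : Int) (height : Int) : List (Int × Int) :=
  (PySem.List.enumerate antenna_locations 0).foldl (fun antinodes il =>
    (PySem.List.pyRange (il.1 + 1) (PySem.List.len antenna_locations) 1).foldl (fun antinodes j =>
      let location2 := PySem.List.pyGetD antenna_locations j (0, 0)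
      let dx := location2.1 - il.2.1
      let dy := location2.2 - il.2.2
      pvUpA il.2.1 il.2.2 dx dy width height pvFuel 1
        (pvDownA il.2.1 il.2.2 dx dy width height pvFuel 0 antinodes)) antinodes) []

-- ===== PORT B =====
def pvAxisBounds (p d limit : Int) : Option (Option Int × Option Int) :=
  if d = 0 then
    if 0 ≤ p ∧ p < limit then some (none, none) else none
  else if 0 < d then
    some (some (-(PySem.Int.floordiv p d)), some (PySem.Int.floordiv (limit - 1 - p) d))
  else
    some (some (-(PySem.Int.floordiv (limit - 1 - p) (-d))), some (PySem.Int.floordiv p (-d)))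

-- `rx[0] if ry[0] is None else ry[0] if rx[0] is None else max(rx[0], ry[0])`
def pvOptMax : Option Int → Option Int → Option Int
  | a, none => a
  | none, b => b
  | some a, some b => some (max a b)

def pvOptMin : Option Int → Option Int → Option Int
  | a, none => a
  | none, b => b
  | some a, some b => some (min a b)

-- body of B's j-loop
def pvPairB (x1 y1 dx dy wd ht : Int) (antinodes : List (Int × Int)) : List (Int × Int) :=
  match pvAxisBounds x1 dx wd, pvAxisBounds y1 dy ht with
  | none, _ => antinodes
  | _, none => antinodes
  | some rx, some ry =>
    match pvOptMax rx.1 ry.1, pvOptMin rx.2 ry.2 with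
    | some lo, some hi =>
      let acc1 := if lo ≤ 0 ∧ 0 ≤ hi then
          (PySem.List.pyRange 0 (lo - 1) (-1)).foldl
            (fun acc n => acc ++ [(x1 + n * dx, y1 + n * dy)]) antinodes
        else antinodes
      if lo ≤ 1 ∧ 1 ≤ hi then
        (PySem.List.pyRange 1 (hi + 1) 1).foldl
          (fun acc n => acc ++ [(x1 + n * dx, y1 + n * dy)]) acc1
      else acc1
    | _, _ => antinodes

def find_antinodes_part2_alt (antenna_locations : List (Int × Int)) (width : Int) (height : Int) : List (Int × Int) :=
  (PySem.List.enumerate antenna_locations 0).foldl (fun antinodes il =>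
    (PySem.List.pyRange (il.1 + 1) (PySem.List.len antenna_locations) 1).foldl (fun antinodes j =>
      let location2 := PySem.List.pyGetD antenna_locations j (0, 0)
      pvPairB il.2.1 il.2.2 (location2.1 - il.2.1) (location2.2 - il.2.2) width height antinodes) antinodes) []

-- ===== PRECONDITION & SPEC =====
-- Pre_ excludes inputs holding two antennas with EQUAL coordinates lying inside the
-- width×height grid: there A's first while-loop never leaves the grid and A loops forever.
def Pre_find_antinodes_part2 (antenna_locations : List (Int × Int)) (width : Int) (height : Int) : Prop :=
  ∀ i, (hi : i < antenna_locations.length) → ∀ j, (hj : j < antenna_locations.length) →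
    i ≠ j → antenna_locations[i] = antenna_locations[j] →
    ¬(0 ≤ antenna_locations[i].1 ∧ antenna_locations[i].1 < width ∧
      0 ≤ antenna_locations[i].2 ∧ antenna_locations[i].2 < height)

instance (antenna_locations : List (Int × Int)) (width : Int) (height : Int) : Decidable (Pre_find_antinodes_part2 antenna_locations width height) := by unfold Pre_find_antinodes_part2; infer_instance

def pvWitness_find_antinodes_part2 : (List (Int × Int)) × Int × Int := ([(0, 0), (2, 1)], 4, 4)

def Spec_find_antinodes_part2 (antenna_locations : List (Int × Int)) (width : Int) (height : Int) (out : List (Int × Int)) : Prop := out = find_antinodes_part2_alt antenna_locations width height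
instance (antenna_locations : List (Int × Int)) (width : Int) (height : Int) (out : List (Int × Int)) : Decidable (Spec_find_antinodes_part2 antenna_locations width height out) := by unfold Spec_find_antinodes_part2; infer_instance

-- ===== CLAIM (what is proved, stated in full; the proofs are below) =====
def Claim_equal_find_antinodes_part2 : Prop := ∀ (antenna_locations : List (Int × Int)) (width : Int) (height : Int), Dom_find_antinodes_part2 antenna_locations width height → Pre_find_antinodes_part2 antenna_locations width height → Spec_find_antinodes_part2 antenna_locations width height (find_antinodes_part2 antenna_locations width height)

-- ===== LEMMAS AND PROOFS =====

-- pvAxisBounds has three shapes; each characterises axis feasibility of the multiplier n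
theorem ax_shape (p d L : Int) :
    (pvAxisBounds p d L = none ∧ ∀ n : Int, ¬(0 ≤ p + n * d ∧ p + n * d < L)) ∨
    (pvAxisBounds p d L = some (none, none) ∧ d = 0 ∧ ∀ n : Int, 0 ≤ p + n * d ∧ p + n * d < L) ∨
    (∃ l u : Int, pvAxisBounds p d L = some (some l, some u) ∧ d ≠ 0 ∧
      ∀ n : Int, (0 ≤ p + n * d ∧ p + n * d < L) ↔ (l ≤ n ∧ n ≤ u)) := by
  unfold pvAxisBounds
  by_cases h0 : d = 0
  · subst h0
    by_cases hin : 0 ≤ p ∧ p < L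
    · right; left; simp [hin]
    · left; simp [hin]
  · right; right
    by_cases hpos : 0 < d
    · refine ⟨-(PySem.Int.floordiv p d), PySem.Int.floordiv (L - 1 - p) d,
        by simp [h0, hpos], h0, ?_⟩
      intro n
      have h1 : (-(PySem.Int.floordiv p d) ≤ n) ↔ ((-n) * d ≤ p) := by
        rw [neg_le, PySem.Int.le_floordiv_iff_mul_le hpos]
      have h2 : (n ≤ PySem.Int.floordiv (L - 1 - p) d) ↔ (n * d ≤ L - 1 - p) := by
        rw [PySem.Int.le_floordiv_iff_mul_le hpos]
      constructor
      · rintro ⟨ha, hb⟩; exact ⟨h1.mpr (by nlinarith), h2.mpr (by nlinarith)⟩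
      · rintro ⟨ha, hb⟩
        have := h1.mp ha; have := h2.mp hb
        constructor <;> nlinarith
    · have hneg : 0 < -d := by omega
      refine ⟨-(PySem.Int.floordiv (L - 1 - p) (-d)), PySem.Int.floordiv p (-d),
        by simp [h0, hpos], h0, ?_⟩
      intro n
      have h1 : (-(PySem.Int.floordiv (L - 1 - p) (-d)) ≤ n) ↔ ((-n) * (-d) ≤ L - 1 - p) := by
        rw [neg_le, PySem.Int.le_floordiv_iff_mul_le hneg]
      have h2 : (n ≤ PySem.Int.floordiv p (-d)) ↔ (n * (-d) ≤ p) := by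
        rw [PySem.Int.le_floordiv_iff_mul_le hneg]
      constructor
      · rintro ⟨ha, hb⟩; exact ⟨h1.mpr (by nlinarith), h2.mpr (by nlinarith)⟩
      · rintro ⟨ha, hb⟩
        have := h1.mp ha; have := h2.mp hb
        constructor <;> nlinarith

theorem downA_stop (x1 y1 dx dy wd ht n : Int) (acc : List (Int × Int)) (f : Nat) (hf : 0 < f)
    (h : ¬(0 ≤ x1 + n * dx ∧ x1 + n * dx < wd ∧ 0 ≤ y1 + n * dy ∧ y1 + n * dy < ht)) :
    pvDownA x1 y1 dx dy wd ht f n acc = acc := by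
  cases f with
  | zero => omega
  | succ g => simp [pvDownA, h]

theorem upA_stop (x1 y1 dx dy wd ht n : Int) (acc : List (Int × Int)) (f : Nat) (hf : 0 < f)
    (h : ¬(0 ≤ x1 + n * dx ∧ x1 + n * dx < wd ∧ 0 ≤ y1 + n * dy ∧ y1 + n * dy < ht)) :
    pvUpA x1 y1 dx dy wd ht f n acc = acc := by
  cases f with
  | zero => omega
  | succ g => simp [pvUpA, h]

theorem downA_run (x1 y1 dx dy wd ht lo hi : Int)
    (hchar : ∀ n : Int, (0 ≤ x1 + n * dx ∧ x1 + n * dx < wd ∧ 0 ≤ y1 + n * dy ∧ y1 + n * dy < ht)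
      ↔ (lo ≤ n ∧ n ≤ hi)) :
    ∀ (f : Nat) (n : Int) (acc : List (Int × Int)), lo ≤ n → n ≤ hi → (n - lo).toNat + 2 ≤ f →
      pvDownA x1 y1 dx dy wd ht f n acc
        = acc ++ (PySem.List.pyRange n (lo - 1) (-1)).map (fun m => (x1 + m * dx, y1 + m * dy)) := by
  intro f
  induction f with
  | zero => intro n acc _ _ hf; omega
  | succ g ih =>
    intro n acc h1 h2 hf
    rw [show pvDownA x1 y1 dx dy wd ht (g + 1) n acc
        = pvDownA x1 y1 dx dy wd ht g (n - 1) (acc ++ [(x1 + n * dx, y1 + n * dy)]) from by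
      simp [pvDownA, (hchar n).mpr ⟨h1, h2⟩]]
    by_cases hl : lo ≤ n - 1
    · rw [ih (n - 1) _ hl (by omega) (by omega)]
      rw [PySem.List.pyRange_neg_one_cons (by omega : lo - 1 < n)]
      simp
    · have hstop : pvDownA x1 y1 dx dy wd ht g (n - 1) (acc ++ [(x1 + n * dx, y1 + n * dy)])
          = acc ++ [(x1 + n * dx, y1 + n * dy)] := by
        apply downA_stop _ _ _ _ _ _ _ _ _ (by omega)
        intro hmem; have := (hchar (n - 1)).mp hmem; omega
      rw [hstop, PySem.List.pyRange_neg_one_cons (by omega : lo - 1 < n),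
        PySem.List.pyRange_neg_one_eq_nil (by omega : n - 1 ≤ lo - 1)]
      simp

theorem upA_run (x1 y1 dx dy wd ht lo hi : Int)
    (hchar : ∀ n : Int, (0 ≤ x1 + n * dx ∧ x1 + n * dx < wd ∧ 0 ≤ y1 + n * dy ∧ y1 + n * dy < ht)
      ↔ (lo ≤ n ∧ n ≤ hi)) :
    ∀ (f : Nat) (n : Int) (acc : List (Int × Int)), lo ≤ n → n ≤ hi → (hi - n).toNat + 2 ≤ f →
      pvUpA x1 y1 dx dy wd ht f n acc
        = acc ++ (PySem.List.pyRange n (hi + 1) 1).map (fun m => (x1 + m * dx, y1 + m * dy)) := by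
  intro f
  induction f with
  | zero => intro n acc _ _ hf; omega
  | succ g ih =>
    intro n acc h1 h2 hf
    rw [show pvUpA x1 y1 dx dy wd ht (g + 1) n acc
        = pvUpA x1 y1 dx dy wd ht g (n + 1) (acc ++ [(x1 + n * dx, y1 + n * dy)]) from by
      simp [pvUpA, (hchar n).mpr ⟨h1, h2⟩]]
    by_cases hl : n + 1 ≤ hi
    · rw [ih (n + 1) _ (by omega) hl (by omega)]
      rw [PySem.List.pyRange_one_cons (by omega : n < hi + 1)]
      simp
    · have hstop : pvUpA x1 y1 dx dy wd ht g (n + 1) (acc ++ [(x1 + n * dx, y1 + n * dy)])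
          = acc ++ [(x1 + n * dx, y1 + n * dy)] := by
        apply upA_stop _ _ _ _ _ _ _ _ _ (by omega)
        intro hmem; have := (hchar (n + 1)).mp hmem; omega
      rw [hstop, PySem.List.pyRange_one_cons (by omega : n < hi + 1),
        PySem.List.pyRange_one_eq_nil (by omega : hi + 1 ≤ n + 1)]
      simp

theorem pvMulBound (d n : Int) (hd : d ≠ 0)
    (h : -4294967296 ≤ n * d ∧ n * d ≤ 4294967296) : -4294967296 ≤ n ∧ n ≤ 4294967296 := by
  have h2 : 1 ≤ |d| := Int.one_le_abs hd
  have h3 : |n| ≤ |n * d| := by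
    rw [abs_mul]; nlinarith [abs_nonneg n]
  have h4 : |n * d| ≤ 4294967296 := abs_le.mpr h
  exact abs_le.mp (le_trans h3 h4)

-- within Dom, a feasible multiplier on a nonzero axis is bounded by 2^32
theorem pvFeasBound (x1 y1 dx dy wd ht : Int)
    (hx1 : -2147483648 ≤ x1 ∧ x1 ≤ 2147483648) (hy1 : -2147483648 ≤ y1 ∧ y1 ≤ 2147483648)
    (hw : wd ≤ 2147483648) (hh : ht ≤ 2147483648) (hd : dx ≠ 0 ∨ dy ≠ 0) (n : Int)
    (h : 0 ≤ x1 + n * dx ∧ x1 + n * dx < wd ∧ 0 ≤ y1 + n * dy ∧ y1 + n * dy < ht) :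
    -4294967296 ≤ n ∧ n ≤ 4294967296 := by
  rcases hd with hd | hd
  · exact pvMulBound dx n hd ⟨by linarith [h.1], by linarith [h.2.1]⟩
  · exact pvMulBound dy n hd ⟨by linarith [h.2.2.1], by linarith [h.2.2.2]⟩

theorem pair_core (x1 y1 dx dy wd ht lo hi : Int)
    (hx1 : -2147483648 ≤ x1 ∧ x1 ≤ 2147483648) (hy1 : -2147483648 ≤ y1 ∧ y1 ≤ 2147483648)
    (hw : wd ≤ 2147483648) (hh : ht ≤ 2147483648) (hd : dx ≠ 0 ∨ dy ≠ 0)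
    (hchar : ∀ n : Int, (0 ≤ x1 + n * dx ∧ x1 + n * dx < wd ∧ 0 ≤ y1 + n * dy ∧ y1 + n * dy < ht)
      ↔ (lo ≤ n ∧ n ≤ hi)) (acc : List (Int × Int)) :
    pvUpA x1 y1 dx dy wd ht pvFuel 1 (pvDownA x1 y1 dx dy wd ht pvFuel 0 acc)
      = (let acc1 := if lo ≤ 0 ∧ 0 ≤ hi then
            (PySem.List.pyRange 0 (lo - 1) (-1)).foldl
              (fun a n => a ++ [(x1 + n * dx, y1 + n * dy)]) acc
          else acc;
        if lo ≤ 1 ∧ 1 ≤ hi then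
          (PySem.List.pyRange 1 (hi + 1) 1).foldl
            (fun a n => a ++ [(x1 + n * dx, y1 + n * dy)]) acc1
        else acc1) := by
  have hbnd : ∀ n : Int, lo ≤ n → n ≤ hi → -4294967296 ≤ n ∧ n ≤ 4294967296 := fun n a b =>
    pvFeasBound x1 y1 dx dy wd ht hx1 hy1 hw hh hd n ((hchar n).mpr ⟨a, b⟩)
  simp only []
  by_cases h0 : lo ≤ 0 ∧ 0 ≤ hi
  · have hlob := hbnd lo (le_refl _) (by omega)
    rw [downA_run x1 y1 dx dy wd ht lo hi hchar pvFuel 0 acc h0.1 h0.2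
      (by unfold pvFuel; omega), if_pos h0]
    by_cases h1 : lo ≤ 1 ∧ 1 ≤ hi
    · have hhib := hbnd hi (by omega) (le_refl _)
      rw [upA_run x1 y1 dx dy wd ht lo hi hchar pvFuel 1 _ h1.1 h1.2
        (by unfold pvFuel; omega), if_pos h1]
      rw [PySem.List.foldl_append_singleton_eq_map, PySem.List.foldl_append_singleton_eq_map]
    · rw [upA_stop x1 y1 dx dy wd ht 1 _ pvFuel (by unfold pvFuel; omega)
        (fun hmem => h1 ((hchar 1).mp hmem)), if_neg h1]
      rw [PySem.List.foldl_append_singleton_eq_map]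
  · rw [downA_stop x1 y1 dx dy wd ht 0 acc pvFuel (by unfold pvFuel; omega)
      (fun hmem => h0 ((hchar 0).mp hmem)), if_neg h0]
    by_cases h1 : lo ≤ 1 ∧ 1 ≤ hi
    · have hhib := hbnd hi (by omega) (le_refl _)
      rw [upA_run x1 y1 dx dy wd ht lo hi hchar pvFuel 1 acc h1.1 h1.2
        (by unfold pvFuel; omega), if_pos h1]
      rw [PySem.List.foldl_append_singleton_eq_map]
    · rw [upA_stop x1 y1 dx dy wd ht 1 acc pvFuel (by unfold pvFuel; omega)
        (fun hmem => h1 ((hchar 1).mp hmem)), if_neg h1]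

theorem pair_eq (x1 y1 dx dy wd ht : Int)
    (hx1 : -2147483648 ≤ x1 ∧ x1 ≤ 2147483648) (hy1 : -2147483648 ≤ y1 ∧ y1 ≤ 2147483648)
    (hw : wd ≤ 2147483648) (hh : ht ≤ 2147483648)
    (hpre : dx = 0 → dy = 0 → ¬(0 ≤ x1 ∧ x1 < wd ∧ 0 ≤ y1 ∧ y1 < ht)) (acc : List (Int × Int)) :
    pvUpA x1 y1 dx dy wd ht pvFuel 1 (pvDownA x1 y1 dx dy wd ht pvFuel 0 acc)
      = pvPairB x1 y1 dx dy wd ht acc := by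
  have hstops : (∀ n : Int, ¬(0 ≤ x1 + n * dx ∧ x1 + n * dx < wd)) ∨
      (∀ n : Int, ¬(0 ≤ y1 + n * dy ∧ y1 + n * dy < ht)) →
      pvUpA x1 y1 dx dy wd ht pvFuel 1 (pvDownA x1 y1 dx dy wd ht pvFuel 0 acc) = acc := by
    intro hno
    have hni : ∀ n : Int, ¬(0 ≤ x1 + n * dx ∧ x1 + n * dx < wd ∧ 0 ≤ y1 + n * dy ∧ y1 + n * dy < ht) := by
      intro n hn
      rcases hno with hno | hno
      · exact hno n ⟨hn.1, hn.2.1⟩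
      · exact hno n ⟨hn.2.2.1, hn.2.2.2⟩
    rw [downA_stop x1 y1 dx dy wd ht 0 acc pvFuel (by unfold pvFuel; omega) (hni 0),
      upA_stop x1 y1 dx dy wd ht 1 acc pvFuel (by unfold pvFuel; omega) (hni 1)]
  rcases ax_shape x1 dx wd with ⟨hx, hxall⟩ | ⟨hx, hdx0, hxall⟩ | ⟨lx, ux, hx, hdx, hxchar⟩ <;>
    rcases ax_shape y1 dy ht with ⟨hy, hyall⟩ | ⟨hy, hdy0, hyall⟩ | ⟨ly, uy, hy, hdy, hychar⟩
  · rw [hstops (Or.inl hxall)]; simp [pvPairB, hx, hy]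
  · rw [hstops (Or.inl hxall)]; simp [pvPairB, hx, hy]
  · rw [hstops (Or.inl hxall)]; simp [pvPairB, hx, hy]
  · rw [hstops (Or.inr hyall)]; simp [pvPairB, hx, hy]
  · -- both axes degenerate and in range: excluded by hpre
    exfalso
    have hxx := hxall 0
    have hyy := hyall 0
    rw [hdx0] at hxx
    rw [hdy0] at hyy
    simp at hxx hyy
    exact hpre hdx0 hdy0 ⟨hxx.1, hxx.2, hyy.1, hyy.2⟩
  · -- x free, y interval
    have hchar : ∀ n : Int,
        (0 ≤ x1 + n * dx ∧ x1 + n * dx < wd ∧ 0 ≤ y1 + n * dy ∧ y1 + n * dy < ht)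
          ↔ (ly ≤ n ∧ n ≤ uy) := by
      intro n
      have hX := hxall n
      have hY := hychar n
      constructor
      · rintro ⟨_, _, c, d⟩; exact hY.mp ⟨c, d⟩
      · intro h; exact ⟨hX.1, hX.2, (hY.mpr h).1, (hY.mpr h).2⟩
    have hrhs : pvPairB x1 y1 dx dy wd ht acc
        = (let acc1 := if ly ≤ 0 ∧ 0 ≤ uy then
              (PySem.List.pyRange 0 (ly - 1) (-1)).foldl
                (fun a n => a ++ [(x1 + n * dx, y1 + n * dy)]) acc
            else acc;
          if ly ≤ 1 ∧ 1 ≤ uy then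
            (PySem.List.pyRange 1 (uy + 1) 1).foldl
              (fun a n => a ++ [(x1 + n * dx, y1 + n * dy)]) acc1
          else acc1) := by
      simp [pvPairB, hx, hy, pvOptMax, pvOptMin]
    rw [hrhs]
    exact pair_core x1 y1 dx dy wd ht ly uy hx1 hy1 hw hh (Or.inr hdy) hchar acc
  · rw [hstops (Or.inr hyall)]; simp [pvPairB, hx, hy]
  · -- x interval, y free
    have hchar : ∀ n : Int,
        (0 ≤ x1 + n * dx ∧ x1 + n * dx < wd ∧ 0 ≤ y1 + n * dy ∧ y1 + n * dy < ht)
          ↔ (lx ≤ n ∧ n ≤ ux) := by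
      intro n
      have hX := hxchar n
      have hY := hyall n
      constructor
      · rintro ⟨a, b, _, _⟩; exact hX.mp ⟨a, b⟩
      · intro h; exact ⟨(hX.mpr h).1, (hX.mpr h).2, hY.1, hY.2⟩
    have hrhs : pvPairB x1 y1 dx dy wd ht acc
        = (let acc1 := if lx ≤ 0 ∧ 0 ≤ ux then
              (PySem.List.pyRange 0 (lx - 1) (-1)).foldl
                (fun a n => a ++ [(x1 + n * dx, y1 + n * dy)]) acc
            else acc;
          if lx ≤ 1 ∧ 1 ≤ ux then
            (PySem.List.pyRange 1 (ux + 1) 1).foldl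
              (fun a n => a ++ [(x1 + n * dx, y1 + n * dy)]) acc1
          else acc1) := by
      simp [pvPairB, hx, hy, pvOptMax, pvOptMin]
    rw [hrhs]
    exact pair_core x1 y1 dx dy wd ht lx ux hx1 hy1 hw hh (Or.inl hdx) hchar acc
  · -- two intervals
    have hchar : ∀ n : Int,
        (0 ≤ x1 + n * dx ∧ x1 + n * dx < wd ∧ 0 ≤ y1 + n * dy ∧ y1 + n * dy < ht)
          ↔ (max lx ly ≤ n ∧ n ≤ min ux uy) := by
      intro n
      have hX := hxchar n
      have hY := hychar n
      constructor
      · rintro ⟨a, b, c, d⟩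
        have h1 := hX.mp ⟨a, b⟩
        have h2 := hY.mp ⟨c, d⟩
        omega
      · intro h
        have h1 := hX.mpr (by omega)
        have h2 := hY.mpr (by omega)
        exact ⟨h1.1, h1.2, h2.1, h2.2⟩
    have hrhs : pvPairB x1 y1 dx dy wd ht acc
        = (let acc1 := if max lx ly ≤ 0 ∧ 0 ≤ min ux uy then
              (PySem.List.pyRange 0 (max lx ly - 1) (-1)).foldl
                (fun a n => a ++ [(x1 + n * dx, y1 + n * dy)]) acc
            else acc;
          if max lx ly ≤ 1 ∧ 1 ≤ min ux uy then
            (PySem.List.pyRange 1 (min ux uy + 1) 1).foldl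
              (fun a n => a ++ [(x1 + n * dx, y1 + n * dy)]) acc1
          else acc1) := by
      simp [pvPairB, hx, hy, pvOptMax, pvOptMin]
    rw [hrhs]
    exact pair_core x1 y1 dx dy wd ht (max lx ly) (min ux uy) hx1 hy1 hw hh (Or.inl hdx) hchar acc

-- ===== VERDICT (by name: the statement is the Claim_ definition above) =====
theorem find_antinodes_part2_spec : Claim_equal_find_antinodes_part2 := by
  intro locs wd ht hdom hpre
  unfold Spec_find_antinodes_part2 find_antinodes_part2 find_antinodes_part2_alt
  simp only [Dom_find_antinodes_part2, pvDomInt, Bool.and_eq_true, List.all_eq_true,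
    decide_eq_true_eq] at hdom
  obtain ⟨⟨hlocs, hwd⟩, hht⟩ := hdom
  apply PySem.List.foldl_congr_mem'
  intro il hil acc
  rw [PySem.List.mem_enumerate_iff] at hil
  obtain ⟨k, hk, rfl⟩ := hil
  apply PySem.List.foldl_congr_mem'
  intro j hj acc'
  rw [PySem.List.mem_pyRange_one] at hj
  obtain ⟨hj1, hj2⟩ := hj
  simp only [PySem.List.len_eq] at hj2
  have hj0 : 0 ≤ j := by omega
  have hjlen : j < (locs.length : Int) := hj2
  have hget : PySem.List.pyGetD locs j ((0 : Int), (0 : Int)) = locs[j.toNat]'(by omega) := by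
    rw [PySem.List.pyGetD_eq_getElem] <;> omega
  simp only [hget]
  have hmem1 := hlocs _ (List.getElem_mem hk)
  apply pair_eq
  · exact hmem1.1
  · exact hmem1.2
  · exact hwd.2
  · exact hht.2
  · intro hdx hdy
    have hkj : k ≠ j.toNat := by omega
    have heq : locs[k] = locs[j.toNat]'(by omega) := by
      have h1 : (locs[j.toNat]'(by omega)).1 = (locs[k]).1 := by omega
      have h2 : (locs[j.toNat]'(by omega)).2 = (locs[k]).2 := by omega
      exact Prod.ext h1.symm h2.symm
    exact hpre k hk j.toNat (by omega) hkj heq
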